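-- pv_equiv track=rewrite | github.com/JoseOrdonezB/proyecto1-LP | src/regex.py | obtener_operando
-- ===== SOURCE A (Python) =====
-- def obtener_operando(resultado):
--     if resultado[-1] == ')':
--         contador = 0
--         for i in range(len(resultado) - 1, -1, -1):
--
--             if resultado[i] == ')':
--                 contador += 1
--
--             elif resultado[i] == '(':
--                 contador -= 1
--
--             if contador == 0:
--                 return resultado[i:], resultado[:i]
--
--     else:
--         return resultado[-1], resultado[:-1]
-- ===== SOURCE B (Python) =====
-- def obtener_operando(resultado):
--     if resultado[-1] != ')':
--         return resultado[-1], resultado[:-1]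
--     # forward pass: the split point is the last index whose prefix balance
--     # (closes minus opens so far) equals the whole string's balance
--     total = resultado.count(')') - resultado.count('(')
--     saldo = 0
--     corte = -1
--     for i, ch in enumerate(resultado):
--         if saldo == total:
--             corte = i
--         if ch == ')':
--             saldo += 1
--         elif ch == '(':
--             saldo -= 1
--     return resultado[corte:], resultado[:corte]
-- ===== Notes on version B (the rewrite author's own statement) =====
-- stated objective: alternative
-- what changed: Instead of A's backward early-exit counter scan, B counts the string's total close-minus-open balance and then makes one forward fold recording the last index whose prefix balance equals that total, which is exactly A's split point.
-- outside the precondition, e.g. on obtener_operando('())'): A returns None, B returns (')', '()'); on obtener_operando(')'): A returns None, B returns (')', ''); on obtener_operando(''): A raises IndexError, B raises IndexError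
import Mathlib
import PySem

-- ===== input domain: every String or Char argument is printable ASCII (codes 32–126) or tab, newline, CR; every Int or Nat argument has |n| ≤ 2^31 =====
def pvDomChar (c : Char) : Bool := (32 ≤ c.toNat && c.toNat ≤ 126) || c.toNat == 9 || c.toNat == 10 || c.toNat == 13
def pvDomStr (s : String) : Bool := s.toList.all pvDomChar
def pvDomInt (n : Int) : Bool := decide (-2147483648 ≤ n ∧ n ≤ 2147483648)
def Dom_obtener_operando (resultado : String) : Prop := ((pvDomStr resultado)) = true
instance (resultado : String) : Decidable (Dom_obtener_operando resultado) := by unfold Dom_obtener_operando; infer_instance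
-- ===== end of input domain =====

-- B splits at the last index whose forward prefix balance equals the whole string's balance
-- (one forward fold after two counts), instead of A's backward counter scan with early exit; objective: alternative.

-- ===== PORT A =====
-- backward loop 'for i in range(len(resultado)-1, -1, -1)' carrying contador; first index where contador == 0
def obtAloop (l : List Char) : List Int → Int → Option Int
  | [], _ => none
  | i :: rest, contador =>
    let ch := PySem.List.pyGetD l i ' '   -- indices produced by the range are always in bounds
    let contador' := if ch = ')' then contador + 1
      else if ch = '(' then contador - 1 else contador
    if contador' = 0 then some i else obtAloop l rest contador'

def obtener_operando (resultado : String) : String × String :=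
  let l := resultado.toList
  if PySem.List.pyGet? l (-1) = some ')' then
    match obtAloop l (PySem.List.pyRange ((l.length : Int) - 1) (-1) (-1)) 0 with
    | some i => (String.ofList (PySem.List.slice l (some i) none), String.ofList (PySem.List.slice l none (some i)))
    | none => ("", "")  -- Python falls off the loop and returns None here: excluded by Pre_
  else
    -- Python raises IndexError on "" (excluded by Pre_); on nonempty input, resultado[-1] is the last char
    (String.ofList ((PySem.List.pyGet? l (-1)).toList), String.ofList (PySem.List.slice l none (some (-1))))

-- ===== PORT B =====
-- loop body of B: record the index whenever the running prefix balance equals total, then update saldo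
def obtBstep (total : Int) (st : Int × Int) (p : Int × Char) : Int × Int :=
  let corte := if st.1 = total then p.1 else st.2
  let saldo := st.1 + (if p.2 = ')' then 1 else if p.2 = '(' then (-1 : Int) else 0)
  (saldo, corte)

def obtener_operando_alt (resultado : String) : String × String :=
  let l := resultado.toList
  if PySem.List.pyGet? l (-1) ≠ some ')' then
    (String.ofList ((PySem.List.pyGet? l (-1)).toList), String.ofList (PySem.List.slice l none (some (-1))))
  else
    let total : Int := (l.count ')' : Int) - (l.count '(' : Int)
    let st := (PySem.List.enumerate l 0).foldl (obtBstep total) (0, -1)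
    (String.ofList (PySem.List.slice l (some st.2) none), String.ofList (PySem.List.slice l none (some st.2)))

-- ===== PRECONDITION & SPEC =====
-- Pre_ excludes the empty string (A raises IndexError) and strings ending in ')' with no balanced
-- suffix, on which A falls off its loop and implicitly returns None instead of a string pair.
def Pre_obtener_operando (resultado : String) : Prop :=
  resultado.toList ≠ [] ∧
  (resultado.toList.getLast? = some ')' →
    ∃ i < resultado.toList.length,
      (resultado.toList.drop i).count ')' = (resultado.toList.drop i).count '(')
instance (resultado : String) : Decidable (Pre_obtener_operando resultado) := by
  unfold Pre_obtener_operando; infer_instance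

def pvWitness_obtener_operando : String := "a(bc)"

def Spec_obtener_operando (resultado : String) (out : String × String) : Prop := out = obtener_operando_alt resultado
instance (resultado : String) (out : String × String) : Decidable (Spec_obtener_operando resultado out) := by unfold Spec_obtener_operando; infer_instance

-- ===== CLAIM (what is proved, stated in full; the proofs are below) =====
def Claim_equal_obtener_operando : Prop := ∀ (resultado : String), Dom_obtener_operando resultado → Pre_obtener_operando resultado → Spec_obtener_operando resultado (obtener_operando resultado)

-- ===== LEMMAS AND PROOFS =====

-- balance (closes minus opens) of the suffix starting at i
def pvBal (l : List Char) (i : Nat) : Int :=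
  ((l.drop i).count ')' : Int) - ((l.drop i).count '(' : Int)

-- balance of the prefix of length i
def pvPref (l : List Char) (i : Nat) : Int :=
  ((l.take i).count ')' : Int) - ((l.take i).count '(' : Int)

def pvDelta (c : Char) : Int := if c = ')' then 1 else if c = '(' then -1 else 0

theorem pvBal_length (l : List Char) : pvBal l l.length = 0 := by
  simp [pvBal]

theorem pvBal_succ (l : List Char) (k : Nat) (hk : k < l.length) :
    pvBal l k = pvDelta l[k] + pvBal l (k + 1) := by
  rw [pvBal, pvBal, List.drop_eq_getElem_cons hk, pvDelta, List.count_cons, List.count_cons]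
  by_cases h1 : l[k] = ')' <;> by_cases h2 : l[k] = '(' <;>
    simp only [h1, h2] <;> simp_all <;> push_cast <;> ring

theorem pvPref_add_pvBal (l : List Char) (k : Nat) :
    pvPref l k + pvBal l k = pvBal l 0 := by
  have h1 : l.count ')' = (l.take k).count ')' + (l.drop k).count ')' := by
    rw [← List.count_append, List.take_append_drop]
  have h2 : l.count '(' = (l.take k).count '(' + (l.drop k).count '(' := by
    rw [← List.count_append, List.take_append_drop]
  rw [pvPref, pvBal, pvBal, List.drop_zero, h1, h2]
  push_cast; ring

-- greatest i ≤ k with pvBal l i = 0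
def pvOmax (l : List Char) : Nat → Option Nat
  | 0 => if pvBal l 0 = 0 then some 0 else none
  | k + 1 => if pvBal l (k + 1) = 0 then some (k + 1) else pvOmax l k

-- one step of A's backward loop turns the balance at k+1 into the balance at k
theorem contador_step (l : List Char) (k : Nat) (hk : k < l.length) :
    (if PySem.List.pyGetD l (k : Int) ' ' = ')' then pvBal l (k + 1) + 1
     else if PySem.List.pyGetD l (k : Int) ' ' = '(' then pvBal l (k + 1) - 1
     else pvBal l (k + 1)) = pvBal l k := by
  rw [PySem.List.pyGetD_natCast, List.getD_eq_getElem l ' ' hk, pvBal_succ l k hk, pvDelta]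
  split_ifs <;> ring

-- A's backward loop returns the greatest index with suffix balance 0
theorem obtAloop_eq (l : List Char) (k : Nat) (hk : k < l.length) :
    obtAloop l (PySem.List.pyRange (k : Int) (-1) (-1)) (pvBal l (k + 1))
      = (pvOmax l k).map (fun i => (i : Int)) := by
  induction k with
  | zero =>
    rw [PySem.List.pyRange_neg_one_cons (by omega)]
    rw [show ((0:Nat):Int) - 1 = -1 by simp, PySem.List.pyRange_neg_one_eq_nil le_rfl]
    show (if _ = 0 then some (0:Int) else obtAloop l [] _) = _
    rw [contador_step l 0 hk]
    by_cases h : pvBal l 0 = 0 <;> simp [h, pvOmax, obtAloop]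
  | succ j ih =>
    rw [PySem.List.pyRange_neg_one_cons (by omega)]
    show (if _ = 0 then some ((j+1 : Nat) : Int) else obtAloop l _ _) = _
    rw [contador_step l (j+1) hk]
    by_cases h : pvBal l (j + 1) = 0
    · simp [h, pvOmax]
    · rw [if_neg h]
      have : ((j + 1 : Nat) : Int) - 1 = (j : Nat) := by push_cast; ring
      rw [this, ih (by omega)]
      simp [pvOmax, h]

-- top-down last index below k whose prefix balance equals total (B's corte)
def pvG (total : Int) (l : List Char) : Nat → Int
  | 0 => -1
  | k + 1 => if pvPref l k = total then (k : Int) else pvG total l k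

theorem pvPref_append_le (m : List Char) (x : Char) (k : Nat) (hk : k ≤ m.length) :
    pvPref (m ++ [x]) k = pvPref m k := by
  rw [pvPref, pvPref, List.take_append_of_le_length hk]

theorem pvPref_append_len (m : List Char) (x : Char) :
    pvPref (m ++ [x]) (m.length + 1) = pvPref m m.length + pvDelta x := by
  rw [pvPref, pvPref, pvDelta]
  rw [show (m ++ [x]).take (m.length + 1) = m ++ [x] by
    apply List.take_of_length_le; simp]
  rw [List.take_length, List.count_append, List.count_append]
  by_cases h1 : x = ')' <;> by_cases h2 : x = '(' <;>
    simp_all <;> push_cast <;> ring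

theorem pvG_append (total : Int) (m : List Char) (x : Char) (k : Nat) (hk : k ≤ m.length) :
    pvG total (m ++ [x]) k = pvG total m k := by
  induction k with
  | zero => rfl
  | succ j ih =>
    rw [pvG, pvG, pvPref_append_le m x j (by omega), ih (by omega)]

-- B's fold computes the final prefix balance and pvG
theorem foldB_eq (total : Int) (l : List Char) :
    (PySem.List.enumerate l 0).foldl (obtBstep total) (0, -1)
      = (pvPref l l.length, pvG total l l.length) := by
  induction l using List.reverseRecOn with
  | nil => simp [PySem.List.enumerate_nil, pvPref, pvG]
  | append_singleton m x ih =>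
    rw [PySem.List.enumerate_append, List.foldl_append, ih, PySem.List.enumerate_cons,
        PySem.List.enumerate_nil]
    simp only [List.foldl_cons, List.foldl_nil, obtBstep]
    rw [List.length_append, List.length_singleton]
    have h1 : pvPref (m ++ [x]) (m.length + 1)
        = pvPref m m.length + (if x = ')' then 1 else if x = '(' then (-1:Int) else 0) := by
      rw [pvPref_append_len]; rfl
    have h2 : pvG total (m ++ [x]) (m.length + 1)
        = if pvPref m m.length = total then (m.length : Int) else pvG total m m.length := by
      rw [pvG, pvPref_append_le m x m.length le_rfl, pvG_append total m x m.length le_rfl]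
    rw [h1, h2]
    simp

theorem pvPref_eq_total_iff (l : List Char) (k : Nat) :
    pvPref l k = pvBal l 0 ↔ pvBal l k = 0 := by
  have h := pvPref_add_pvBal l k
  omega

theorem pvG_eq_omax (l : List Char) (k : Nat) :
    pvG (pvBal l 0) l (k + 1) = (pvOmax l k).elim (-1) (fun i => (i : Int)) := by
  induction k with
  | zero =>
    rw [pvG, pvOmax]
    by_cases h : pvBal l 0 = 0
    · rw [if_pos ((pvPref_eq_total_iff l 0).mpr h), if_pos h]; rfl
    · rw [if_neg (fun hc => h ((pvPref_eq_total_iff l 0).mp hc)), if_neg h]; rfl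
  | succ j ih =>
    rw [pvG, pvOmax]
    by_cases h : pvBal l (j + 1) = 0
    · rw [if_pos ((pvPref_eq_total_iff l (j+1)).mpr h), if_pos h]; rfl
    · rw [if_neg (fun hc => h ((pvPref_eq_total_iff l (j+1)).mp hc)), if_neg h, ih]

theorem pvOmax_isSome (l : List Char) (k : Nat) (h : ∃ i ≤ k, pvBal l i = 0) :
    ∃ j, pvOmax l k = some j := by
  induction k with
  | zero =>
    obtain ⟨i, hi, hb⟩ := h
    interval_cases i
    exact ⟨0, by rw [pvOmax, if_pos hb]⟩
  | succ j ih =>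
    by_cases hb : pvBal l (j + 1) = 0
    · exact ⟨j + 1, by rw [pvOmax, if_pos hb]⟩
    · obtain ⟨i, hi, hbi⟩ := h
      have hij : i ≤ j := by
        rcases Nat.lt_or_ge i (j+1) with h'|h'
        · omega
        · exfalso; exact hb (by rwa [show j + 1 = i by omega])
      obtain ⟨m, hm⟩ := ih ⟨i, hij, hbi⟩
      exact ⟨m, by rw [pvOmax, if_neg hb, hm]⟩

-- ===== VERDICT (by name: the statement is the Claim_ definition above) =====
theorem obtener_operando_spec : Claim_equal_obtener_operando := by
  intro resultado _ hpre
  obtain ⟨hne, hlast⟩ := hpre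
  unfold Spec_obtener_operando obtener_operando obtener_operando_alt
  set l := resultado.toList with hl
  by_cases hch : PySem.List.pyGet? l (-1) = some ')'
  · rw [if_pos hch, if_neg (by simp [hch])]
    have hn : 1 ≤ l.length := List.length_pos_of_ne_nil hne
    have hlast' : l.getLast? = some ')' := by rwa [PySem.List.pyGet?_neg_one] at hch
    obtain ⟨i, hi, hcnt⟩ := hlast hlast'
    have hk : l.length - 1 < l.length := by omega
    have hbal : pvBal l ((l.length - 1) + 1) = 0 := by
      rw [show l.length - 1 + 1 = l.length by omega]; exact pvBal_length l
    obtain ⟨j, hj⟩ := pvOmax_isSome l (l.length - 1)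
      ⟨i, by omega, by rw [pvBal]; omega⟩
    have hA := obtAloop_eq l (l.length - 1) hk
    rw [hbal] at hA
    have hcast : ((l.length : Int) - 1) = ((l.length - 1 : Nat) : Int) := by
      push_cast [hn]; ring
    rw [hcast, hA, hj]
    have htot : ((l.count ')' : Int) - (l.count '(' : Int)) = pvBal l 0 := by
      rw [pvBal]; simp
    have hB := foldB_eq (pvBal l 0) l
    have hGoal : pvG (pvBal l 0) l l.length = (j : Int) := by
      rw [show l.length = (l.length - 1) + 1 by omega, pvG_eq_omax, hj]; rfl
    rw [htot]
    simp [hB, hGoal]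
  · rw [if_neg hch, if_pos (by simp [hch])]
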